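-- pv_equiv track=rewrite | github.com/mireklzicar/cellarc | scripts/resplit_dataset.py | collect_query_windows
-- ===== SOURCE A (Python) =====
-- from collections import Counter
-- from typing import Dict, Iterable, List, Optional, Sequence, Tuple
--
-- def centered_window(seq: Sequence[int], idx: int, width: int, wrap: bool) -> Tuple[int, ...]:
--     """Return the neighbourhood window centred on idx."""
--
--     half = width // 2
--     n = len(seq)
--     if n == 0 or width <= 0:
--         return ()
--     if wrap:
--         return tuple(seq[(idx - half + j) % n] for j in range(width))
--     window: List[int] = []
--     for j in range(idx - half, idx + half + 1):
--         if 0 <= j < n: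
--             window.append(seq[j])
--         else:
--             window.append(0)
--     return tuple(window)
--
-- def collect_query_windows(query: Sequence[int], width: int, wrap: bool) -> Counter:
--     """Count centred windows present in the query sequence."""
--
--     counts: Counter = Counter()
--     if width <= 0:
--         return counts
--     n = len(query)
--     if n == 0:
--         return counts
--     for idx in range(n):
--         win = centered_window(query, idx, width, wrap=wrap)
--         counts[win] += 1
--     return counts
-- ===== SOURCE B (Python) =====
-- from collections import Counter
--
-- def collect_query_windows(query, width, wrap):
--     """Count centred windows by slicing a precomputed padded/tiled sequence."""
--     counts = Counter()
--     if width <= 0: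
--         return counts
--     q = list(query)
--     n = len(q)
--     if n == 0:
--         return counts
--     half = width // 2
--     if wrap:
--         reps = (width + n - 1) // n + 1
--         ring = q * reps
--         for idx in range(n):
--             start = (idx - half) % n
--             counts[tuple(ring[start:start + width])] += 1
--     else:
--         w = 2 * half + 1
--         padded = [0] * half + q + [0] * half
--         for idx in range(n):
--             counts[tuple(padded[idx:idx + w])] += 1
--     return counts
-- ===== Notes on version B (the rewrite author's own statement) =====
-- stated objective: alternative
-- what changed: Instead of recomputing each window element-by-element with per-index bounds checks / modular indexing, B precomputes one extended sequence (zero-padded list for non-wrap, a tiled ring for wrap) and takes each window as a single contiguous slice.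
import Mathlib
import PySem

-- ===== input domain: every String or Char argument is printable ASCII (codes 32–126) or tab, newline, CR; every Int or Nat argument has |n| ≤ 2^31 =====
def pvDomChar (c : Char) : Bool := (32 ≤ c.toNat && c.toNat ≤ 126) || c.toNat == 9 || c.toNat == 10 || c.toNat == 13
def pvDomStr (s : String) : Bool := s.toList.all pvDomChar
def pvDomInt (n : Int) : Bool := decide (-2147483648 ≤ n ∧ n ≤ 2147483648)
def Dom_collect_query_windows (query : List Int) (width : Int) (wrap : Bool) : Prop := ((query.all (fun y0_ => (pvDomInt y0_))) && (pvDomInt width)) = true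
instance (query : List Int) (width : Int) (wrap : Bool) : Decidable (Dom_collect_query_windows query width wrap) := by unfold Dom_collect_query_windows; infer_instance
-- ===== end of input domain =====

-- B inlines the padding/tiling: one extended sequence built once, each window a contiguous slice (alternative decomposition, same cost).

-- ===== PORT A =====
-- seq[j] is written pyGetD … 0: every index A actually uses is in range (mod n, or bounds-checked), so the default is never read.
def centered_window (seq : List Int) (idx : Int) (width : Int) (wrap : Bool) : List Int :=
  let half := PySem.Int.floordiv width 2
  let n := PySem.List.len seq
  if n = 0 ∨ width ≤ 0 then []
  else if wrap then
    (PySem.List.pyRange 0 width 1).map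
      (fun j => PySem.List.pyGetD seq (PySem.Int.mod (idx - half + j) n) 0)
  else
    (PySem.List.pyRange (idx - half) (idx + half + 1) 1).map
      (fun j => if 0 ≤ j ∧ j < n then PySem.List.pyGetD seq j 0 else 0)

def collect_query_windows (query : List Int) (width : Int) (wrap : Bool) : List (List Int × Int) :=
  if width ≤ 0 then (PySem.Dict.empty : PySem.Dict (List Int) Int).items
  else
    let n := PySem.List.len query
    if n = 0 then (PySem.Dict.empty : PySem.Dict (List Int) Int).items
    else
      ((PySem.List.pyRange 0 n 1).foldl
        (fun d idx =>
          let win := centered_window query idx width wrap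
          d.insert win (d.getD win 0 + 1))
        (PySem.Dict.empty : PySem.Dict (List Int) Int)).items

-- ===== PORT B =====
def collect_query_windows_alt (query : List Int) (width : Int) (wrap : Bool) : List (List Int × Int) :=
  if width ≤ 0 then (PySem.Dict.empty : PySem.Dict (List Int) Int).items
  else
    let n := PySem.List.len query
    if n = 0 then (PySem.Dict.empty : PySem.Dict (List Int) Int).items
    else
      let half := PySem.Int.floordiv width 2
      if wrap then
        let reps := PySem.Int.floordiv (width + n - 1) n + 1
        let ring := (List.replicate reps.toNat query).flatten
        ((PySem.List.pyRange 0 n 1).foldl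
          (fun d idx =>
            let start := PySem.Int.mod (idx - half) n
            let win := PySem.List.slice ring (some start) (some (start + width))
            d.insert win (d.getD win 0 + 1))
          (PySem.Dict.empty : PySem.Dict (List Int) Int)).items
      else
        let w := 2 * half + 1
        let padded := List.replicate half.toNat (0 : Int) ++ query ++ List.replicate half.toNat (0 : Int)
        ((PySem.List.pyRange 0 n 1).foldl
          (fun d idx =>
            let win := PySem.List.slice padded (some idx) (some (idx + w))
            d.insert win (d.getD win 0 + 1))
          (PySem.Dict.empty : PySem.Dict (List Int) Int)).items

-- ===== PRECONDITION & SPEC =====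
def Spec_collect_query_windows (query : List Int) (width : Int) (wrap : Bool) (out : List (List Int × Int)) : Prop := out = collect_query_windows_alt query width wrap
instance (query : List Int) (width : Int) (wrap : Bool) (out : List (List Int × Int)) : Decidable (Spec_collect_query_windows query width wrap out) := by unfold Spec_collect_query_windows; infer_instance

-- ===== CLAIM (what is proved, stated in full; the proofs are below) =====
def Claim_equal_collect_query_windows : Prop := ∀ (query : List Int) (width : Int) (wrap : Bool), Dom_collect_query_windows query width wrap → Spec_collect_query_windows query width wrap (collect_query_windows query width wrap)

-- ===== LEMMAS AND PROOFS =====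

theorem padded_getD (q : List Int) (h m : Nat) :
    (List.replicate h (0:Int) ++ q ++ List.replicate h (0:Int)).getD m 0 =
      if h ≤ m ∧ m < h + q.length then q.getD (m - h) 0 else 0 := by
  simp [List.getD, List.getElem?_append, List.getElem?_replicate]
  split_ifs <;> simp_all <;> omega

theorem flatten_replicate_getD (q : List Int) (r m : Nat) (hm : m < r * q.length) :
    (List.replicate r q).flatten.getD m 0 = q.getD (m % q.length) 0 := by
  induction r generalizing m with
  | zero => omega
  | succ r ih =>
    rw [Nat.succ_mul] at hm
    simp only [List.replicate_succ, List.flatten_cons]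
    by_cases hlt : m < q.length
    · rw [List.getD_append _ _ _ _ hlt, Nat.mod_eq_of_lt hlt]
    · have hq : q.length ≠ 0 := by intro h0; simp [h0] at hm hlt
      rw [List.getD_append_right _ _ _ _ (by omega)]
      rw [ih (m - q.length) (by omega)]
      rw [(Nat.mod_eq_sub_mod (Nat.le_of_not_lt hlt)).symm]

theorem window_eq_nowrap (query : List Int) (idx width : Int) (h0 : 0 < width)
    (hn : query ≠ []) (hi : 0 ≤ idx) (hi2 : idx < PySem.List.len query) :
    centered_window query idx width false =
      PySem.List.slice
        (List.replicate (PySem.Int.floordiv width 2).toNat (0 : Int) ++ query ++ List.replicate (PySem.Int.floordiv width 2).toNat (0 : Int))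
        (some idx) (some (idx + (2 * PySem.Int.floordiv width 2 + 1))) := by
  have hQ : 0 < query.length := List.length_pos_iff.mpr hn
  set half := PySem.Int.floordiv width 2 with hhalf
  have hh0 : 0 ≤ half := by
    rw [hhalf, PySem.Int.floordiv_eq_ediv_of_pos (by norm_num)]
    exact Int.ediv_nonneg (by omega) (by norm_num)
  set h := half.toNat with hh
  have hhZ : half = (h : Int) := by omega
  have hi2' : idx < (query.length : Int) := by simpa [PySem.List.len] using hi2
  rw [PySem.List.slice_toNat _ (by omega) (by omega)]
  have hcond : ¬(PySem.List.len query = 0 ∨ width ≤ 0) := by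
    simp [PySem.List.len]
    constructor
    · exact hn
    · omega
  simp only [centered_window]
  rw [if_neg hcond]
  simp only [Bool.false_eq_true, if_false]
  rw [PySem.List.pyRange_one]
  have harg : (idx + half + 1 - (idx - half)).toNat = 2 * h + 1 := by omega
  rw [harg]
  have htk : (idx + (2 * half + 1)).toNat - idx.toNat = 2 * h + 1 := by omega
  rw [htk]
  apply List.ext_getElem
  · simp
    omega
  · intro k hk1 hk2
    simp only [List.getElem_map, List.getElem_range, List.getElem_take, List.getElem_drop]
    rw [← hhalf]
    have hk : k < 2 * h + 1 := by simpa [harg] using hk1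
    have hpad := padded_getD query h (idx.toNat + k)
    rw [List.getD_eq_getElem _ _ (by simp; omega)] at hpad
    rw [hpad]
    simp only [PySem.List.len_eq]
    by_cases hc : h ≤ idx.toNat + k ∧ idx.toNat + k < h + query.length
    · rw [if_pos hc, if_pos (by omega)]
      rw [PySem.List.pyGetD_eq_getElem _ _ (by omega) (by omega)]
      rw [List.getD_eq_getElem _ _ (by omega)]
      congr 1
      omega
    · rw [if_neg hc, if_neg (by omega)]

theorem window_eq_wrap (query : List Int) (idx width : Int) (h0 : 0 < width)
    (hn : query ≠ []) :
    centered_window query idx width true =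
      PySem.List.slice
        ((List.replicate (PySem.Int.floordiv (width + PySem.List.len query - 1) (PySem.List.len query) + 1).toNat query).flatten)
        (some (PySem.Int.mod (idx - PySem.Int.floordiv width 2) (PySem.List.len query)))
        (some (PySem.Int.mod (idx - PySem.Int.floordiv width 2) (PySem.List.len query) + width)) := by
  have hQ : 0 < query.length := List.length_pos_iff.mpr hn
  have hlenq : PySem.List.len query = (query.length : Int) := by simp [PySem.List.len]
  rw [hlenq]
  set N : Int := (query.length : Int) with hN
  have hN0 : 0 < N := by omega
  set half := PySem.Int.floordiv width 2 with hhalf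
  set start := PySem.Int.mod (idx - half) N with hstart
  have hs0 : 0 ≤ start := PySem.Int.mod_nonneg _ hN0
  have hs1 : start < N := PySem.Int.mod_lt _ hN0
  set reps := PySem.Int.floordiv (width + N - 1) N + 1 with hreps
  have e1 := PySem.Int.floordiv_mul_add_mod (width + N - 1) N
  have e2 := PySem.Int.mod_nonneg (width + N - 1) hN0
  have e3 := PySem.Int.mod_lt (width + N - 1) hN0
  have hrep : width + N ≤ reps * N := by
    have h4 : reps * N = PySem.Int.floordiv (width + N - 1) N * N + N := by rw [hreps]; ring
    linarith
  have hreps0 : 0 ≤ reps := by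
    rw [hreps, PySem.Int.floordiv_eq_ediv_of_pos hN0]
    have := Int.ediv_nonneg (show 0 ≤ width + N - 1 by omega) (le_of_lt hN0)
    omega
  have hringlen : ((List.replicate reps.toNat query).flatten).length = reps.toNat * query.length := by
    simp [List.length_flatten, List.map_replicate, List.sum_replicate, Nat.mul_comm]
  have hcast : ((reps.toNat * query.length : Nat) : Int) = reps * N := by
    push_cast
    rw [Int.toNat_of_nonneg hreps0]
  have hbound : start.toNat + width.toNat ≤ reps.toNat * query.length := by
    have : (start.toNat + width.toNat : Int) ≤ (reps.toNat * query.length : Nat) := by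
      rw [hcast]
      rw [Int.toNat_of_nonneg hs0, Int.toNat_of_nonneg (le_of_lt h0)]
      linarith
    exact_mod_cast this
  rw [PySem.List.slice_toNat _ hs0 (by omega)]
  have hcond : ¬(PySem.List.len query = 0 ∨ width ≤ 0) := by
    simp [PySem.List.len]
    constructor
    · exact hn
    · omega
  simp only [centered_window]
  rw [if_neg hcond, if_pos trivial]
  rw [PySem.List.pyRange_one]
  have htk : (start + width).toNat - start.toNat = width.toNat := by omega
  rw [htk]
  apply List.ext_getElem
  · simp [hringlen]
    omega
  · intro k hk1 hk2
    simp only [List.getElem_map, List.getElem_range, List.getElem_take, List.getElem_drop, zero_add]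
    have hk : k < width.toNat := by simpa using hk1
    have hpad := flatten_replicate_getD query reps.toNat (start.toNat + k) (by omega)
    rw [List.getD_eq_getElem _ _ (by omega)] at hpad
    rw [hpad]
    rw [← hhalf]
    have hmod : PySem.Int.mod (idx - half + ↑k) (PySem.List.len query) = (((start.toNat + k) % query.length : Nat) : Int) := by
      rw [hlenq]
      rw [PySem.Int.mod_eq_emod_of_pos hN0]
      push_cast
      rw [Int.toNat_of_nonneg hs0]
      conv_rhs => rw [hstart, PySem.Int.mod_eq_emod_of_pos hN0]
      rw [Int.emod_add_emod]
    rw [hmod]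
    rw [PySem.List.pyGetD_eq_getElem _ _ (by positivity) (by exact_mod_cast Nat.mod_lt _ hQ)]
    rw [List.getD_eq_getElem _ _ (Nat.mod_lt _ hQ)]
    congr 1

-- ===== VERDICT (by name: the statement is the Claim_ definition above) =====
theorem collect_query_windows_spec : Claim_equal_collect_query_windows := by
  intro query width wrap _
  unfold Spec_collect_query_windows collect_query_windows collect_query_windows_alt
  by_cases hw : width ≤ 0
  · simp [hw]
  · simp only [if_neg hw]
    by_cases hne : query = []
    · subst hne; simp [PySem.List.len]
    · have hq : PySem.List.len query ≠ 0 := by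
        simp [PySem.List.len, List.length_eq_zero_iff]; exact hne
      simp only [if_neg hq]
      cases wrap
      · simp only [Bool.false_eq_true, if_false]
        congr 1
        apply PySem.List.foldl_congr_mem
        intro d idx hmem
        rw [PySem.List.mem_pyRange_one] at hmem
        rw [window_eq_nowrap query idx width (by omega) hne hmem.1 hmem.2]
      · simp only [if_true]
        congr 1
        apply PySem.List.foldl_congr_mem
        intro d idx hmem
        rw [PySem.List.mem_pyRange_one] at hmem
        rw [window_eq_wrap query idx width (by omega) hne]
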